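-- pv_equiv track=rewrite | github.com/krstian-estbn/cs11-project | world/map.py | initial_player_pos
-- ===== SOURCE A (Python) =====
-- def initial_player_pos(level):
--     s = (-1, -1)
--     m = 0
--     for r, row in enumerate(level):
--         for c, cell in enumerate(row):
--                 if cell == '+':
--                     m += 1
--                     continue
--                 if cell == "L":
--                     s = (r, c)
--     return (s, m)
-- ===== SOURCE B (Python) =====
-- def initial_player_pos(level):
--     m = sum(row.count('+') for row in level)
--     for r, row in reversed(list(enumerate(level))):
--         for c, cell in reversed(list(enumerate(row))):
--             if cell == 'L':
--                 return ((r, c), m)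
--     return ((-1, -1), m)
-- ===== Notes on version B (the rewrite author's own statement) =====
-- stated objective: alternative
-- what changed: Replaces the fused forward loop that threads both accumulators with two independent passes: a count of '+' via row.count summed over rows, and a reverse row-major scan that returns at the FIRST 'L' found (equal to A's last-overwrite result).
import Mathlib
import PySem

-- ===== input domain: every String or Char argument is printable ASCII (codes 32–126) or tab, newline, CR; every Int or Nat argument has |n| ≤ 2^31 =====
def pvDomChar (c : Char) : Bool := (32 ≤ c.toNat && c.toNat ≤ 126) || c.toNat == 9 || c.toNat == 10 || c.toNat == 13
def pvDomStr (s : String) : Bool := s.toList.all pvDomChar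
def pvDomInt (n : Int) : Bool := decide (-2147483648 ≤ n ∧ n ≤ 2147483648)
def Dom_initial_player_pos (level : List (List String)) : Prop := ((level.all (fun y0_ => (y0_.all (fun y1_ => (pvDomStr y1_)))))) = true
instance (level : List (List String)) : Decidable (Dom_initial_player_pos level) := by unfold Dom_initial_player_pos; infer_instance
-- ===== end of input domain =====

-- ===== PORT A =====
-- A fuses both results into one forward loop with state ((s), m).
def initial_player_pos (level : List (List String)) : (Int × Int) × Int :=
  (PySem.List.enumerate level 0).foldl
    (fun (st : (Int × Int) × Int) (p : Int × List String) =>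
      (PySem.List.enumerate p.2 0).foldl
        (fun (st : (Int × Int) × Int) (q : Int × String) =>
          if q.2 = "+" then (st.1, st.2 + 1)
          else if q.2 = "L" then ((p.1, q.1), st.2)
          else st) st)
    ((-1, -1), 0)

-- ===== PORT B =====
-- B: count '+' per row and sum; then reverse row-major scan returning at the first 'L'.
def initial_player_pos_alt (level : List (List String)) : (Int × Int) × Int :=
  let m : Int := (level.map (fun row => ((PySem.List.count row "+" : Nat) : Int))).sum
  match (PySem.List.enumerate level 0).reverse.findSome?
      (fun (p : Int × List String) =>
        ((PySem.List.enumerate p.2 0).reverse.find? (fun q => q.2 = "L")).map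
          (fun q => (p.1, q.1))) with
  | some pos => (pos, m)
  | none => ((-1, -1), m)

-- ===== PRECONDITION & SPEC =====
def Spec_initial_player_pos (level : List (List String)) (out : (Int × Int) × Int) : Prop := out = initial_player_pos_alt level
instance (level : List (List String)) (out : (Int × Int) × Int) : Decidable (Spec_initial_player_pos level out) := by unfold Spec_initial_player_pos; infer_instance

-- ===== CLAIM (what is proved, stated in full; the proofs are below) =====
def Claim_equal_initial_player_pos : Prop := ∀ (level : List (List String)), Dom_initial_player_pos level → Spec_initial_player_pos level (initial_player_pos level)

-- ===== LEMMAS AND PROOFS =====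

-- Inner-loop characterisation: the fused loop over one row's cells updates m by the
-- number of '+' cells and s to the last 'L' index (first in reverse), else keeps s.
theorem pv_inner (r : Int) (ps : List (Int × String)) (st : (Int × Int) × Int) :
    ps.foldl
      (fun (st : (Int × Int) × Int) (q : Int × String) =>
        if q.2 = "+" then (st.1, st.2 + 1)
        else if q.2 = "L" then ((r, q.1), st.2)
        else st) st
    = ((match ps.reverse.find? (fun q => q.2 = "L") with
        | some q => (r, q.1)
        | none => st.1),
       st.2 + (((ps.map Prod.snd).count "+" : Nat) : Int)) := by
  induction ps generalizing st with
  | nil => simp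
  | cons a ps ih =>
    simp only [List.foldl_cons, ih, List.reverse_cons, List.find?_append, List.map_cons]
    by_cases hL : a.2 = "L"
    · have hp : ¬ a.2 = "+" := by simp [hL]
      cases hfind : ps.reverse.find? (fun q => q.2 = "L") with
      | some q => simp [hL]
      | none => simp [hL]
    · by_cases hp : a.2 = "+"
      · cases hfind : ps.reverse.find? (fun q => q.2 = "L") with
        | some q => simp [hp]; ring
        | none => simp [hp]; ring
      · cases hfind : ps.reverse.find? (fun q => q.2 = "L") with
        | some q => simp [hL, hp]
        | none => simp [hL, hp]

-- Outer-loop characterisation in terms of B's reverse findSome? and the per-row counts.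
theorem pv_outer (qs : List (Int × List String)) (st : (Int × Int) × Int) :
    qs.foldl
      (fun (st : (Int × Int) × Int) (p : Int × List String) =>
        (PySem.List.enumerate p.2 0).foldl
          (fun (st : (Int × Int) × Int) (q : Int × String) =>
            if q.2 = "+" then (st.1, st.2 + 1)
            else if q.2 = "L" then ((p.1, q.1), st.2)
            else st) st) st
    = ((match qs.reverse.findSome?
          (fun (p : Int × List String) =>
            ((PySem.List.enumerate p.2 0).reverse.find? (fun q => q.2 = "L")).map
              (fun q => (p.1, q.1))) with
        | some pos => pos
        | none => st.1),
       st.2 + (qs.map (fun p => ((PySem.List.count p.2 "+" : Nat) : Int))).sum) := by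
  induction qs generalizing st with
  | nil => simp
  | cons a qs ih =>
    rw [List.foldl_cons, ih, pv_inner]
    simp only [List.reverse_cons, List.findSome?_append, PySem.List.map_snd_enumerate,
      PySem.List.count, List.map_cons, List.sum_cons]
    cases hfs : qs.reverse.findSome?
        (fun (p : Int × List String) =>
          ((PySem.List.enumerate p.2 0).reverse.find? (fun q => q.2 = "L")).map
            (fun q => (p.1, q.1))) with
    | some pos => simp; ring
    | none =>
      cases hfind : (PySem.List.enumerate a.2 0).reverse.find? (fun q => q.2 = "L") with
      | some q => simp [hfind]; ring
      | none => simp [hfind]; ring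

-- ===== VERDICT (by name: the statement is the Claim_ definition above) =====
theorem initial_player_pos_spec : Claim_equal_initial_player_pos := by
  intro level _
  unfold Spec_initial_player_pos initial_player_pos initial_player_pos_alt
  rw [pv_outer]
  have hmap : (PySem.List.enumerate level 0).map
      (fun p => ((PySem.List.count p.2 "+" : Nat) : Int))
      = level.map (fun row => ((PySem.List.count row "+" : Nat) : Int)) := by
    rw [show level.map (fun row => ((PySem.List.count row "+" : Nat) : Int))
          = ((PySem.List.enumerate level 0).map Prod.snd).map
              (fun row => ((PySem.List.count row "+" : Nat) : Int))
        from by rw [PySem.List.map_snd_enumerate], List.map_map]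
    rfl
  rw [hmap]
  cases hfs : (PySem.List.enumerate level 0).reverse.findSome?
      (fun (p : Int × List String) =>
        ((PySem.List.enumerate p.2 0).reverse.find? (fun q => q.2 = "L")).map
          (fun q => (p.1, q.1))) with
  | some pos => simp
  | none => simp
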